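-- pv_equiv track=rewrite | github.com/hello2calls/IOS_TTB | scripts/antiharassUpdate/aliyun/text2pic.py | changetext
-- ===== SOURCE A (Python) =====
-- def changetext(text):
--     ret = ''
--     size = len(text)
--     i = 0
--     while i < size:
--         if i < size-1 and text[i] == '<' and text[i+1] == 'b':
--             i += 6
--             ret += '\n'
--             continue
--         ret += text[i]
--         i += 1
--     #print ret
--     return ret
-- ===== SOURCE B (Python) =====
-- def changetext(text):
--     parts = []
--     i = 0
--     while True:
--         j = text.find('<b', i)
--         if j == -1:
--             parts.append(text[i:])
--             break
--         parts.append(text[i:j])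
--         parts.append('\n')
--         i = j + 6
--     return ''.join(parts)
-- ===== Notes on version B (the rewrite author's own statement) =====
-- stated objective: faster
-- what changed: Replaces the char-by-char index loop with repeated str.find to locate each tag start, copying whole slices between matches and joining the pieces at the end instead of repeated string concatenation.
import Mathlib
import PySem

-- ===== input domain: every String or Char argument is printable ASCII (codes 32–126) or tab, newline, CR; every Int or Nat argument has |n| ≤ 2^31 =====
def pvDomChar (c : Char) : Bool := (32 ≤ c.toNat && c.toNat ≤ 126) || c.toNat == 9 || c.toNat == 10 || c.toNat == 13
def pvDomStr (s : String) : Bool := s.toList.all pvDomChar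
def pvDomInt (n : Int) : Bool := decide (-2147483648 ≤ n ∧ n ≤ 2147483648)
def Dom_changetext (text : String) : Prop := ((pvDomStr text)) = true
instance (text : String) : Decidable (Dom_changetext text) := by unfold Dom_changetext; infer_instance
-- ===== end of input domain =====

-- B replaces A's char-by-char index loop by a find-the-next-'<b' loop copying whole
-- slices between matches (idiomatic; return value only, no mutation involved).

-- ===== PORT A =====
-- A scans index by index: on "<b" it skips 6 positions and emits '\n', else copies one char.
def changetextGoA : List Char → List Char
  | [] => []
  | '<' :: 'b' :: rest => '\n' :: changetextGoA (rest.drop 4)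
  | c :: rest => c :: changetextGoA rest
termination_by s => s.length
decreasing_by
  · simp only [List.length_drop, List.length_cons]; omega
  · simp

def changetext (text : String) : String := String.ofList (changetextGoA text.toList)

-- ===== PORT B =====
-- index of the first occurrence of "<b" (text.find('<b', i) relative to the suffix)
def changetextFind : List Char → Option Nat
  | [] => none
  | '<' :: 'b' :: _ => some 0
  | _ :: rest => (changetextFind rest).map (· + 1)

theorem changetextFind_le {s : List Char} {j : Nat} (hf : changetextFind s = some j) :
    j + 2 ≤ s.length := by
  have h := hf
  induction s using changetextFind.induct generalizing j with
  | case1 => simp [changetextFind] at h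
  | case2 => simp [changetextFind] at h; simp only [List.length_cons]; omega
  | case3 c rest h1 ih =>
      rw [changetextFind.eq_def] at h
      rcases s' : changetextFind rest with _ | k
      · split at h <;> simp_all
      · have := ih s'
        split at h <;> simp_all <;> omega

-- B: copy the slice up to each match, emit '\n', resume 6 positions after the '<'.
def changetextGoB (s : List Char) : List Char :=
  match h : changetextFind s with
  | none => s
  | some j => s.take j ++ '\n' :: changetextGoB (s.drop (j + 6))
termination_by s.length
decreasing_by
  have := changetextFind_le h
  simp; omega

def changetext_alt (text : String) : String := String.ofList (changetextGoB text.toList)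

-- ===== PRECONDITION & SPEC =====
def Spec_changetext (text : String) (out : String) : Prop := out = changetext_alt text
instance (text : String) (out : String) : Decidable (Spec_changetext text out) := by unfold Spec_changetext; infer_instance

-- ===== CLAIM (what is proved, stated in full; the proofs are below) =====
def Claim_equal_changetext : Prop := ∀ (text : String), Dom_changetext text → Spec_changetext text (changetext text)

-- ===== LEMMAS AND PROOFS =====
theorem changetextGoA_nil : changetextGoA [] = [] := by rw [changetextGoA]

theorem changetextGoA_hit (rest : List Char) :
    changetextGoA ('<' :: 'b' :: rest) = '\n' :: changetextGoA (rest.drop 4) := by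
  rw [changetextGoA]

theorem changetextGoA_cons {c : Char} {rest : List Char}
    (h : ¬(c = '<' ∧ rest.head? = some 'b')) :
    changetextGoA (c :: rest) = c :: changetextGoA rest := by
  rw [changetextGoA.eq_def]
  split
  · simp_all
  · rename_i heq; injection heq with h1 h2; exact absurd ⟨h1, by rw [h2]; rfl⟩ h
  · rename_i heq; injection heq with h1 h2; subst h1; subst h2; rfl

theorem changetextFind_cons {c : Char} {rest : List Char}
    (h : ¬(c = '<' ∧ rest.head? = some 'b')) :
    changetextFind (c :: rest) = (changetextFind rest).map (· + 1) := by
  rw [changetextFind.eq_def]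
  split
  · simp_all
  · rename_i heq; injection heq with h1 h2; exact absurd ⟨h1, by rw [h2]; rfl⟩ h
  · rename_i heq; injection heq with h1 h2; subst h1; subst h2; rfl

theorem changetextGoB_none {s : List Char} (h : changetextFind s = none) :
    changetextGoB s = s := by
  rw [changetextGoB]
  split
  · rfl
  · rename_i j heq; rw [h] at heq; cases heq

theorem changetextGoB_some {s : List Char} {j : Nat} (h : changetextFind s = some j) :
    changetextGoB s = s.take j ++ '\n' :: changetextGoB (s.drop (j + 6)) := by
  rw [changetextGoB]
  split
  · rename_i heq; rw [h] at heq; cases heq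
  · rename_i k heq; rw [h] at heq; injection heq with hk; subst hk; rfl

theorem changetextGo_eq : ∀ (n : Nat) (s : List Char), s.length ≤ n → changetextGoA s = changetextGoB s := by
  intro n
  induction n with
  | zero =>
      intro s hs
      have : s = [] := by cases s <;> simp_all
      subst this
      rw [changetextGoB_none rfl, changetextGoA_nil]
  | succ n ih =>
      intro s hs
      rcases s with _ | ⟨c, rest⟩
      · rw [changetextGoB_none rfl, changetextGoA_nil]
      · by_cases hm : c = '<' ∧ rest.head? = some 'b'
        · obtain ⟨hc, hd⟩ := hm
          subst hc
          rcases rest with _ | ⟨d, rest'⟩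
          · cases hd
          · have hd' : d = 'b' := by simpa using hd
            subst hd'
            rw [changetextGoA_hit,
              changetextGoB_some (show changetextFind ('<' :: 'b' :: rest') = some 0 from rfl)]
            simp only [List.take_zero, List.nil_append, List.drop_succ_cons]
            have : rest'.length.succ.succ ≤ n + 1 := by simpa using hs
            rw [ih (rest'.drop 4) (by simp; omega)]
        · rw [changetextGoA_cons hm]
          rcases hr : changetextFind rest with _ | j
          · rw [changetextGoB_none (by rw [changetextFind_cons hm, hr]; rfl)]
            rw [ih rest (by simp at hs; omega), changetextGoB_none hr]
          · rw [changetextGoB_some (show changetextFind (c :: rest) = some (j + 1) from by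
              rw [changetextFind_cons hm, hr]; rfl)]
            rw [ih rest (by simp at hs; omega), changetextGoB_some hr]
            simp [List.take_succ_cons, List.drop_succ_cons]

-- ===== VERDICT (by name: the statement is the Claim_ definition above) =====
theorem changetext_spec : Claim_equal_changetext := by
  intro text _
  unfold Spec_changetext changetext changetext_alt
  rw [changetextGo_eq text.toList.length text.toList le_rfl]
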